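-- pv_equiv track=rewrite | github.com/seungwoneeee/Algorithm | 백준/Gold/17609. 회문/회문.py | check
-- ===== SOURCE A (Python) =====
-- def palindrome(s: str, l: int, r: int) -> bool:
--     while l < r:
--         if s[l] != s[r]:
--             return False
--         l += 1
--         r -= 1
--     return True
--
-- def check(s: str) -> int:
--     l, r = 0, len(s) - 1
--
--     while l < r:
--         if s[l] == s[r]:
--             l += 1
--             r -= 1
--         else:
--             if palindrome(s, l + 1, r) or palindrome(s, l, r - 1):
--                 return 1
--             return 2
--
--     return 0
-- ===== SOURCE B (Python) =====
-- def check(s: str) -> int: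
--     if s == s[::-1]:
--         return 0
--     for i in range(len(s)):
--         t = s[:i] + s[i+1:]
--         if t == t[::-1]:
--             return 1
--     return 2
-- ===== Notes on version B (the rewrite author's own statement) =====
-- stated objective: simpler
-- what changed: Replaced the two-pointer scan with first-mismatch probing by a plain brute force: whole-string palindrome test, then trying every one-character deletion with a slice/reverse palindrome test.
import Mathlib
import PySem

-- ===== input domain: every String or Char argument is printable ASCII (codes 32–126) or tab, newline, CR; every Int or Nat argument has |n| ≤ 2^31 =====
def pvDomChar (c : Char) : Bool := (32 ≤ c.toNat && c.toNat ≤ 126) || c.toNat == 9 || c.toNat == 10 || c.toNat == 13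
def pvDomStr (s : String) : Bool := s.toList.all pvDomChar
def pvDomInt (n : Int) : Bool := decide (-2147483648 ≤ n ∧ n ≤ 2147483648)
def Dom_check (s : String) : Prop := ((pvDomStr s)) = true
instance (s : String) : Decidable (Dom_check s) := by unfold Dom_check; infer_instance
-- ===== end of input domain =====

-- B replaces A's two-pointer scan with first-mismatch probing by a plain brute force over
-- all one-character deletions, each tested with a slice/reverse palindrome check (simpler, not faster).

-- ===== PORT A =====
-- the `fuel` argument only makes the two `while l < r` loops total; it is large enough to never run out
def pvPalGo : ℕ → List Char → Int → Int → Bool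
  | 0, _, _, _ => true
  | fuel + 1, cs, l, r =>
    if l < r then
      if PySem.List.pyGet? cs l ≠ PySem.List.pyGet? cs r then false
      else pvPalGo fuel cs (l + 1) (r - 1)
    else true

def pvPal (cs : List Char) (l r : Int) : Bool := pvPalGo (r - l).toNat cs l r

def checkGo : ℕ → List Char → Int → Int → Int
  | 0, _, _, _ => 0
  | fuel + 1, cs, l, r =>
    if l < r then
      if PySem.List.pyGet? cs l = PySem.List.pyGet? cs r then checkGo fuel cs (l + 1) (r - 1)
      else if pvPal cs (l + 1) r || pvPal cs l (r - 1) then 1 else 2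
    else 0

def check (s : String) : Int :=
  checkGo ((s.toList.length : Int) - 1).toNat s.toList 0 ((s.toList.length : Int) - 1)

-- ===== PORT B =====
def altLoop (cs : List Char) (idxs : List Int) : Int :=
  match idxs with
  | [] => 2
  | i :: rest =>
    let t := PySem.List.slice cs none (some i) ++ PySem.List.slice cs (some (i + 1)) none
    if t = t.reverse then 1 else altLoop cs rest

def check_alt (s : String) : Int :=
  if s.toList = s.toList.reverse then 0
  else altLoop s.toList (PySem.List.pyRange 0 (s.toList.length : Int) 1)

-- ===== PRECONDITION & SPEC =====
def Spec_check (s : String) (out : Int) : Prop := out = check_alt s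
instance (s : String) (out : Int) : Decidable (Spec_check s out) := by unfold Spec_check; infer_instance

-- ===== CLAIM (what is proved, stated in full; the proofs are below) =====
def Claim_equal_check : Prop := ∀ (s : String), Dom_check s → Spec_check s (check s)

-- ===== LEMMAS AND PROOFS =====

/-- The common characterization both ports are reduced to: 0 for a palindrome, else 1 iff
some one-character deletion is a palindrome, else 2. -/
def bruteSpec (cs : List Char) : Int :=
  if cs = cs.reverse then 0
  else if (List.range cs.length).any (fun i => decide (cs.eraseIdx i = (cs.eraseIdx i).reverse)) then 1 else 2

/-- What `pvPal` tests, as pairwise equalities. -/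
def PalI (cs : List Char) (a b : Int) : Prop :=
  ∀ d : ℕ, a + d < b - d → PySem.List.pyGet? cs (a + d) = PySem.List.pyGet? cs (b - d)

lemma pvPal_iff_aux (cs : List Char) :
    ∀ (k : ℕ) (a b : Int), (b - a).toNat ≤ k → (pvPalGo k cs a b = true ↔ PalI cs a b) := by
  intro k
  induction k with
  | zero =>
    intro a b hk
    have hab : ¬ a < b := by omega
    rw [pvPalGo]
    constructor
    · intro _ d hd; exfalso; omega
    · intro _; rfl
  | succ k ih =>
    intro a b hk
    by_cases hab : a < b
    · rw [pvPalGo, if_pos hab]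
      by_cases hne : PySem.List.pyGet? cs a ≠ PySem.List.pyGet? cs b
      · rw [if_pos hne]
        simp only [Bool.false_eq_true, false_iff]
        intro hP
        exact hne (by simpa using hP 0 (by push_cast; omega))
      · rw [if_neg hne]
        push_neg at hne
        rw [ih (a + 1) (b - 1) (by omega)]
        constructor
        · intro hP d hd
          cases d with
          | zero => simpa using hne
          | succ m =>
            push_cast at hd
            have h2 := hP m (by omega)
            have e1 : a + ((m + 1 : ℕ) : ℤ) = (a + 1) + (m : ℤ) := by push_cast; ring
            have e2 : b - ((m + 1 : ℕ) : ℤ) = (b - 1) - (m : ℤ) := by push_cast; ring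
            rw [e1, e2]
            exact h2
        · intro hP d hd
          have h2 := hP (d + 1) (by push_cast; omega)
          have e1 : a + ((d + 1 : ℕ) : ℤ) = (a + 1) + (d : ℤ) := by push_cast; ring
          have e2 : b - ((d + 1 : ℕ) : ℤ) = (b - 1) - (d : ℤ) := by push_cast; ring
          rw [e1, e2] at h2
          exact h2
    · rw [pvPalGo, if_neg hab]
      constructor
      · intro _ d hd; exfalso; omega
      · intro _; rfl

lemma pvPal_iff (cs : List Char) (a b : Int) : pvPal cs a b = true ↔ PalI cs a b :=
  pvPal_iff_aux cs (b - a).toNat a b le_rfl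

lemma rev_iff (cs : List Char) :
    cs = cs.reverse ↔ ∀ i : ℕ, i < cs.length → cs[i]? = cs[cs.length - 1 - i]? := by
  constructor
  · intro h i hi
    conv_lhs => rw [h]
    exact List.getElem?_reverse hi
  · intro h
    apply List.ext_getElem?
    intro i
    by_cases hi : i < cs.length
    · rw [List.getElem?_reverse hi]
      exact h i hi
    · have h1 : cs[i]? = none := by
        rw [List.getElem?_eq_none_iff]; omega
      have h2 : cs.reverse[i]? = none := by
        rw [List.getElem?_eq_none_iff, List.length_reverse]; omega
     
      rw [h1, h2]

/-- Extract one symmetric pair from a `PalI` fact. -/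
lemma palI_get {cs : List Char} {a b : Int} (h : PalI cs a b) {x y : ℕ}
    (hax : a ≤ (x : ℤ)) (hay : a ≤ (y : ℤ)) (hsum : (x : ℤ) + y = a + b) :
    cs[x]? = cs[y]? := by
  rcases lt_trichotomy x y with h1 | h1 | h1
  · have hd := h ((x : ℤ) - a).toNat (by omega)
    rw [show a + (((x : ℤ) - a).toNat : ℤ) = ((x : ℕ) : ℤ) by omega,
        show b - (((x : ℤ) - a).toNat : ℤ) = ((y : ℕ) : ℤ) by omega,
        PySem.List.pyGet?_natCast, PySem.List.pyGet?_natCast] at hd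
    exact hd
  · rw [h1]
  · have hd := h ((y : ℤ) - a).toNat (by omega)
    rw [show a + (((y : ℤ) - a).toNat : ℤ) = ((y : ℕ) : ℤ) by omega,
        show b - (((y : ℤ) - a).toNat : ℤ) = ((x : ℕ) : ℤ) by omega,
        PySem.List.pyGet?_natCast, PySem.List.pyGet?_natCast] at hd
    exact hd.symm

lemma erase_length {cs : List Char} {i : ℕ} (hi : i < cs.length) :
    (cs.eraseIdx i).length = cs.length - 1 := by
  rw [List.length_eraseIdx, if_pos hi]

/-- Pairwise form of "deleting index `i` yields a palindrome". -/
lemma erase_pairs {cs : List Char} {i : ℕ} (hi : i < cs.length)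
    (hp : cs.eraseIdx i = (cs.eraseIdx i).reverse) (j : ℕ) (hj : j < cs.length - 1) :
    (if j < i then cs[j]? else cs[j + 1]?) =
      (if cs.length - 2 - j < i then cs[cs.length - 2 - j]? else cs[cs.length - 2 - j + 1]?) := by
  have hel := erase_length hi
  have h2 := (rev_iff _).mp hp j (by rw [hel]; omega)
  rw [hel, show cs.length - 1 - 1 - j = cs.length - 2 - j by omega,
      List.getElem?_eraseIdx, List.getElem?_eraseIdx] at h2
  exact h2

lemma erase_pal_of_pairs {cs : List Char} {i : ℕ} (hi : i < cs.length)
    (hp : ∀ j : ℕ, j < cs.length - 1 →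
      (if j < i then cs[j]? else cs[j + 1]?) =
        (if cs.length - 2 - j < i then cs[cs.length - 2 - j]? else cs[cs.length - 2 - j + 1]?)) :
    cs.eraseIdx i = (cs.eraseIdx i).reverse := by
  have hel := erase_length hi
  rw [rev_iff]
  intro j hj
  rw [hel] at hj
  rw [hel, show cs.length - 1 - 1 - j = cs.length - 2 - j by omega,
      List.getElem?_eraseIdx, List.getElem?_eraseIdx]
  exact hp j hj

/-- If the tail segment past the mismatch is a palindrome, deleting the left mismatch works. -/
lemma erase_pal_of_left (cs : List Char) (l : ℕ)
    (hl2 : (l : ℤ) < (cs.length : ℤ) - 1 - l)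
    (inv : ∀ d : ℕ, d < l → cs[d]? = cs[cs.length - 1 - d]?)
    (h : PalI cs ((l : ℤ) + 1) ((cs.length : ℤ) - 1 - l)) :
    cs.eraseIdx l = (cs.eraseIdx l).reverse := by
  apply erase_pal_of_pairs (by omega)
  intro j hj
  by_cases h1 : j < l
  · rw [if_pos h1, if_neg (by omega : ¬ cs.length - 2 - j < l),
        show cs.length - 2 - j + 1 = cs.length - 1 - j by omega]
    exact inv j h1
  · rw [if_neg h1]
    by_cases h2 : cs.length - 2 - j < l
    · rw [if_pos h2]
      have h3 := inv (cs.length - 2 - j) h2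
      rw [show cs.length - 1 - (cs.length - 2 - j) = j + 1 by omega] at h3
      exact h3.symm
    · rw [if_neg h2, show cs.length - 2 - j + 1 = cs.length - 1 - j by omega]
      exact palI_get h (by omega) (by omega) (by omega)

/-- If the segment up to just before the right mismatch is a palindrome, deleting the right mismatch works. -/
lemma erase_pal_of_right (cs : List Char) (l : ℕ)
    (hl2 : (l : ℤ) < (cs.length : ℤ) - 1 - l)
    (inv : ∀ d : ℕ, d < l → cs[d]? = cs[cs.length - 1 - d]?)
    (h : PalI cs (l : ℤ) ((cs.length : ℤ) - 1 - l - 1)) :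
    cs.eraseIdx (cs.length - 1 - l) = (cs.eraseIdx (cs.length - 1 - l)).reverse := by
  apply erase_pal_of_pairs (by omega)
  intro j hj
  by_cases h1 : j < l
  · rw [if_pos (by omega : j < cs.length - 1 - l),
        if_neg (by omega : ¬ cs.length - 2 - j < cs.length - 1 - l),
        show cs.length - 2 - j + 1 = cs.length - 1 - j by omega]
    exact inv j h1
  · by_cases h2 : j < cs.length - 1 - l
    · rw [if_pos h2, if_pos (by omega : cs.length - 2 - j < cs.length - 1 - l)]
      exact palI_get h (by omega) (by omega) (by omega)
    · rw [if_neg h2, if_pos (by omega : cs.length - 2 - j < cs.length - 1 - l)]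
      have h3 := inv (cs.length - 2 - j) (by omega)
      rw [show cs.length - 1 - (cs.length - 2 - j) = j + 1 by omega] at h3
      exact h3.symm

/-- Converse: a palindromic one-character deletion forces one of the two probes at the first mismatch. -/
lemma left_or_right_of_erase (cs : List Char) (l : ℕ)
    (hl2 : (l : ℤ) < (cs.length : ℤ) - 1 - l)
    (inv : ∀ d : ℕ, d < l → cs[d]? = cs[cs.length - 1 - d]?)
    (hne : cs[l]? ≠ cs[cs.length - 1 - l]?)
    (i : ℕ) (hi : i < cs.length)
    (hp : cs.eraseIdx i = (cs.eraseIdx i).reverse) :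
    PalI cs ((l : ℤ) + 1) ((cs.length : ℤ) - 1 - l) ∨ PalI cs (l : ℤ) ((cs.length : ℤ) - 1 - l - 1) := by
  have pairs := erase_pairs hi hp
  have hnotmid : ¬ (l < i ∧ i < cs.length - 1 - l) := by
    rintro ⟨ha, hb⟩
    have hP := pairs l (by omega)
    rw [if_pos (by omega : l < i), if_neg (by omega : ¬ cs.length - 2 - l < i),
        show cs.length - 2 - l + 1 = cs.length - 1 - l by omega] at hP
    exact hne hP
  by_cases hil : i ≤ l
  · left
    intro d hd
    rw [show ((l : ℤ) + 1 + d) = ((l + 1 + d : ℕ) : ℤ) by omega,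
        show ((cs.length : ℤ) - 1 - l - d) = ((cs.length - 1 - l - d : ℕ) : ℤ) by omega,
        PySem.List.pyGet?_natCast, PySem.List.pyGet?_natCast]
    have hP := pairs (l + d) (by omega)
    rw [if_neg (by omega : ¬ l + d < i), if_neg (by omega : ¬ cs.length - 2 - (l + d) < i),
        show l + d + 1 = l + 1 + d by omega,
        show cs.length - 2 - (l + d) + 1 = cs.length - 1 - l - d by omega] at hP
    exact hP
  · right
    have hir : cs.length - 1 - l ≤ i := by omega
    intro d hd
    rw [show ((l : ℤ) + d) = ((l + d : ℕ) : ℤ) by omega,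
        show ((cs.length : ℤ) - 1 - l - 1 - d) = ((cs.length - 2 - l - d : ℕ) : ℤ) by omega,
        PySem.List.pyGet?_natCast, PySem.List.pyGet?_natCast]
    have hP := pairs (l + d) (by omega)
    rw [if_pos (by omega : l + d < i), if_pos (by omega : cs.length - 2 - (l + d) < i),
        show cs.length - 2 - (l + d) = cs.length - 2 - l - d by omega] at hP
    exact hP

lemma bruteSpec_eq_zero (cs : List Char) (l : ℕ)
    (hlr : ¬ ((l : ℤ) < (cs.length : ℤ) - 1 - l))
    (inv : ∀ d : ℕ, d < l → cs[d]? = cs[cs.length - 1 - d]?) :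
    bruteSpec cs = 0 := by
  have hpal : cs = cs.reverse := by
    rw [rev_iff]
    intro i hi
    rcases lt_or_ge i l with h1 | h1
    · exact inv i h1
    · rcases lt_or_ge (cs.length - 1 - i) l with h2 | h2
      · have h3 := inv _ h2
        rw [show cs.length - 1 - (cs.length - 1 - i) = i by omega] at h3
        exact h3.symm
      · rw [show cs.length - 1 - i = i by omega]
  rw [bruteSpec, if_pos hpal]

lemma checkGo_eq (cs : List Char) :
    ∀ (k l : ℕ), ((cs.length : ℤ) - 1 - l - l).toNat ≤ k →
      (∀ d : ℕ, d < l → cs[d]? = cs[cs.length - 1 - d]?) →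
      checkGo k cs (l : ℤ) ((cs.length : ℤ) - 1 - l) = bruteSpec cs := by
  intro k
  induction k with
  | zero =>
    intro l hk inv
    rw [checkGo]
    exact (bruteSpec_eq_zero cs l (by omega) inv).symm
  | succ k ih =>
    intro l hk inv
    by_cases hlr : (l : ℤ) < (cs.length : ℤ) - 1 - l
    · rw [checkGo, if_pos hlr]
      have hr : ((cs.length : ℤ) - 1 - l) = ((cs.length - 1 - l : ℕ) : ℤ) := by omega
      by_cases heq : PySem.List.pyGet? cs (l : ℤ) = PySem.List.pyGet? cs ((cs.length : ℤ) - 1 - l)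
      · rw [if_pos heq]
        rw [hr, PySem.List.pyGet?_natCast, PySem.List.pyGet?_natCast] at heq
        rw [show ((l : ℤ) + 1) = ((l + 1 : ℕ) : ℤ) by omega,
            show ((cs.length : ℤ) - 1 - l - 1) = ((cs.length : ℤ) - 1 - ((l + 1 : ℕ) : ℤ)) by push_cast; ring]
        apply ih (l + 1) (by omega)
        intro d hd
        rcases lt_or_ge d l with h1 | h1
        · exact inv d h1
        · rw [show d = l by omega]
          exact heq
      · rw [if_neg heq]
        rw [hr, PySem.List.pyGet?_natCast, PySem.List.pyGet?_natCast] at heq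
        have hnotpal : ¬ cs = cs.reverse := fun hp => heq ((rev_iff cs).mp hp l (by omega))
        rw [bruteSpec, if_neg hnotpal]
        have hiff : (pvPal cs ((l : ℤ) + 1) ((cs.length : ℤ) - 1 - l) ||
              pvPal cs (l : ℤ) ((cs.length : ℤ) - 1 - l - 1)) = true ↔
            (List.range cs.length).any
              (fun i => decide (cs.eraseIdx i = (cs.eraseIdx i).reverse)) = true := by
          rw [Bool.or_eq_true, pvPal_iff, pvPal_iff, List.any_eq_true]
          constructor
          · rintro (h | h)
            · exact ⟨l, by simp only [List.mem_range]; omega,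
                by simpa using erase_pal_of_left cs l hlr inv h⟩
            · exact ⟨cs.length - 1 - l, by simp only [List.mem_range]; omega,
                by simpa using erase_pal_of_right cs l hlr inv h⟩
          · rintro ⟨i, hi, hpi⟩
            simp only [List.mem_range] at hi
            simp only [decide_eq_true_eq] at hpi
            exact left_or_right_of_erase cs l hlr inv heq i hi hpi
        by_cases hb : (pvPal cs ((l : ℤ) + 1) ((cs.length : ℤ) - 1 - l) ||
            pvPal cs (l : ℤ) ((cs.length : ℤ) - 1 - l - 1)) = true
        · rw [if_pos hb, if_pos (hiff.mp hb)]
        · rw [if_neg hb, if_neg (fun h => hb (hiff.mpr h))]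
    · rw [checkGo, if_neg hlr]
      exact (bruteSpec_eq_zero cs l hlr inv).symm

lemma check_eq (s : String) : check s = bruteSpec s.toList := by
  have h := checkGo_eq s.toList ((s.toList.length : ℤ) - 1).toNat 0 (by omega)
    (fun d hd => absurd hd (Nat.not_lt_zero d))
  rw [check]
  simpa using h

lemma altLoop_eq (cs : List Char) :
    ∀ idxs : List Int, (∀ i ∈ idxs, 0 ≤ i) →
      altLoop cs idxs =
        if idxs.any (fun i => decide (cs.eraseIdx i.toNat = (cs.eraseIdx i.toNat).reverse)) then 1 else 2 := by
  intro idxs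
  induction idxs with
  | nil => intro _; simp [altLoop]
  | cons i rest ih =>
    intro hpos
    have hi0 : 0 ≤ i := hpos i List.mem_cons_self
    have ht : PySem.List.slice cs none (some i) ++ PySem.List.slice cs (some (i + 1)) none
        = cs.eraseIdx i.toNat := by
      rw [PySem.List.slice_to cs hi0, PySem.List.slice_from cs (by omega : (0 : ℤ) ≤ i + 1),
          show (i + 1).toNat = i.toNat + 1 by omega, ← List.eraseIdx_eq_take_drop_succ]
    simp only [altLoop]
    rw [ht, List.any_cons]
    by_cases hp : cs.eraseIdx i.toNat = (cs.eraseIdx i.toNat).reverse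
    · rw [if_pos hp, decide_eq_true hp, Bool.true_or, if_pos rfl]
    · rw [if_neg hp, decide_eq_false hp, Bool.false_or]
      exact ih (fun j hj => hpos j (List.mem_cons_of_mem _ hj))

lemma check_alt_eq (s : String) : check_alt s = bruteSpec s.toList := by
  rw [check_alt, bruteSpec]
  by_cases hp : s.toList = s.toList.reverse
  · rw [if_pos hp, if_pos hp]
  · rw [if_neg hp, if_neg hp]
    rw [altLoop_eq _ _ (fun i hi => (PySem.List.mem_pyRange_one.mp hi).1)]
    have hany : (PySem.List.pyRange 0 (s.toList.length : Int) 1).any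
          (fun i => decide (s.toList.eraseIdx i.toNat = (s.toList.eraseIdx i.toNat).reverse))
        = (List.range s.toList.length).any
          (fun i => decide (s.toList.eraseIdx i = (s.toList.eraseIdx i).reverse)) := by
      rw [PySem.List.pyRange_one, List.any_map,
          show (((s.toList.length : ℤ) - 0).toNat) = s.toList.length by omega]
      congr 1
      funext k
      simp [Function.comp]
    rw [hany]

-- ===== VERDICT (by name: the statement is the Claim_ definition above) =====
theorem check_spec : Claim_equal_check := by
  intro s _
  show check s = check_alt s
  rw [check_eq, check_alt_eq]
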